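-- pv_equiv track=rewrite | github.com/XavierC4Q/python_playground | codewars/howGreenIsMyValley.py | make_valley
-- ===== SOURCE A (Python) =====
-- def find_highest(arr):
--     high = { 'index': 0, 'value': arr[0] }
--     for i in range(1, len(arr)):
--         if arr[i] > high['value']:
--             high['index'] = i
--             high['value'] = arr[i]
--
--     new_arr = arr[0: high['index']] + arr[high['index'] + 1:]
--     return { 'high': high['value'], 'new_arr': new_arr }
--
-- def make_valley(arr):
--     '''
--     How Green is my Valley
--     The problem is worded weird, but essentially you
--     are building a valley. Basically you find the
--     highest points, and build from the top down.
--     The first highest is the left, the second highest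
--     is the right and it alternates.
--     '''
--     left = []
--     right = []
--     go_left = True
--     go_right = False
--
--
--     while len(arr):
--         high = find_highest(arr)
--         arr = high['new_arr']
--
--         if go_left:
--             left.append(high['high'])
--             go_left = False
--             go_right = True
--         elif go_right:
--             right = [high['high']] + right
--             go_left = True
--             go_right = False
--
--     return left + right
-- ===== SOURCE B (Python) =====
-- def make_valley(arr):
--     s = sorted(arr, reverse=True)
--     left, right = [], []
--     for i, x in enumerate(s):
--         if i % 2 == 0:
--             left.append(x)
--         else:
--             right.append(x)
--     return left + right[::-1]
-- ===== Notes on version B (the rewrite author's own statement) =====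
-- stated objective: faster
-- what changed: A repeatedly scans the remaining list to extract the first maximum (O(n^2)); B sorts once in descending order and distributes elements by index parity in a single pass, reversing the right half at the end.
import Mathlib
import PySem

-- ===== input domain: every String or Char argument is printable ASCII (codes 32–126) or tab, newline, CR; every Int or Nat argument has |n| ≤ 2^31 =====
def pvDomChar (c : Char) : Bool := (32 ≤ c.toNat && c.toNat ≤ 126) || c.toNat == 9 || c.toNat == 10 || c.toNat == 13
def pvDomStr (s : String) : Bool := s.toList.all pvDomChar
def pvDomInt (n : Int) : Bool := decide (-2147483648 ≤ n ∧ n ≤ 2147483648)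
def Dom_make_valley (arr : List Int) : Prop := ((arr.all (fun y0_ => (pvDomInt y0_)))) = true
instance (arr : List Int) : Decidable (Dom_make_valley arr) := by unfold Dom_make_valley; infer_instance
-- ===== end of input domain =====

-- B replaces A's repeated first-max extraction by one descending sort plus a single
-- parity-split pass (measured asymptotically faster); equivalence is proved on all inputs.


-- ===== PORT A =====
-- find_highest: scan for the (first) maximum and its index, return the max and the list
-- without that occurrence.  arr[i] is ported as pyGetD with default 0: every index used
-- (0 and the range 1..len) is in range, so this is exact where the Python returns.
def findHighest (arr : List Int) : Int × List Int :=
  let high := (PySem.List.pyRange 1 (arr.length : Int) 1).foldl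
    (fun h i => if PySem.List.pyGetD arr i 0 > h.2 then (i, PySem.List.pyGetD arr i 0) else h)
    ((0 : Int), PySem.List.pyGetD arr 0 0)
  (high.2, PySem.List.slice arr (some 0) (some high.1) ++ PySem.List.slice arr (some (high.1 + 1)) none)

-- the while-loop of make_valley; fuel = arr.length makes it structural (each iteration
-- removes one element, so the fuel is never exhausted early)
def loopA : Nat → List Int → List Int → List Int → Bool → Bool → List Int
  | 0, _, l, r, _, _ => l ++ r
  | fuel + 1, arr, l, r, goLeft, goRight =>
    if arr.isEmpty then l ++ r
    else
      let high := findHighest arr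
      if goLeft then loopA fuel high.2 (l ++ [high.1]) r false true
      else if goRight then loopA fuel high.2 l (high.1 :: r) true false
      else loopA fuel high.2 l r goLeft goRight

def make_valley (arr : List Int) : List Int :=
  loopA arr.length arr [] [] true false

-- ===== PORT B =====
def make_valley_alt (arr : List Int) : List Int :=
  let s := PySem.List.sorted arr (fun x => x) true
  let lr := (PySem.List.enumerate s 0).foldl
    (fun lr p => if PySem.Int.mod p.1 2 == 0 then (lr.1 ++ [p.2], lr.2) else (lr.1, lr.2 ++ [p.2]))
    (([] : List Int), ([] : List Int))
  lr.1 ++ ((PySem.List.slice? lr.2 none none (-1)).getD [])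

-- ===== PRECONDITION & SPEC =====
def Spec_make_valley (arr : List Int) (out : List Int) : Prop := out = make_valley_alt arr
instance (arr : List Int) (out : List Int) : Decidable (Spec_make_valley arr out) := by unfold Spec_make_valley; infer_instance

-- ===== CLAIM (what is proved, stated in full; the proofs are below) =====
def Claim_equal_make_valley : Prop := ∀ (arr : List Int), Dom_make_valley arr → Spec_make_valley arr (make_valley arr)

-- ===== LEMMAS AND PROOFS =====

-- alternating split of the sorted list: (elements taken at "left" turns, at "right" turns)
def splitB : Bool → List Int → List Int × List Int
  | _, [] => ([], [])
  | true, x :: t => ((splitB false t).1.cons x, (splitB false t).2)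
  | false, x :: t => ((splitB true t).1, x :: (splitB true t).2)

def sortDesc (arr : List Int) : List Int := PySem.List.sorted arr (fun x => x) true

-- invariant of find_highest's scan: the state is an in-range index whose value dominates
-- the prefix already scanned
def GoodFH (arr : List Int) (a : Int) (st : Int × Int) : Prop :=
  0 ≤ st.1 ∧ st.1 < a ∧ PySem.List.pyGetD arr st.1 0 = st.2 ∧
    ∀ j : Int, 0 ≤ j → j < a → PySem.List.pyGetD arr j 0 ≤ st.2

theorem fold_goodFH (arr : List Int) (m : Nat) : ∀ (a : Int) (st : Int × Int),
    a + m = arr.length → 1 ≤ a → GoodFH arr a st →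
    GoodFH arr arr.length ((PySem.List.pyRange a (arr.length : Int) 1).foldl
      (fun h i => if PySem.List.pyGetD arr i 0 > h.2 then (i, PySem.List.pyGetD arr i 0) else h) st) := by
  induction m with
  | zero =>
    intro a st ha h1 hg
    have : a = (arr.length : Int) := by omega
    subst this
    rw [PySem.List.pyRange_one_eq_nil le_rfl]
    simpa using hg
  | succ m ih =>
    intro a st ha h1 hg
    have hlt : a < (arr.length : Int) := by omega
    rw [PySem.List.pyRange_one_cons hlt, List.foldl_cons]
    refine ih (a + 1) _ (by omega) (by omega) ?_
    obtain ⟨hs0, hsa, hsv, hdom⟩ := hg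
    by_cases hc : PySem.List.pyGetD arr a 0 > st.2
    · rw [if_pos hc]
      refine ⟨by omega, by omega, rfl, ?_⟩
      intro j hj0 hj1
      rcases lt_or_eq_of_le (by omega : j ≤ a) with h | h
      · exact le_of_lt (lt_of_le_of_lt (hdom j hj0 h) hc)
      · subst h; rfl
    · rw [if_neg hc]
      refine ⟨hs0, by omega, hsv, ?_⟩
      intro j hj0 hj1
      rcases lt_or_eq_of_le (by omega : j ≤ a) with h | h
      · exact hdom j hj0 h
      · subst h; omega

theorem findHighest_spec (arr : List Int) (h : arr ≠ []) :
    ∃ idx : Nat, idx < arr.length ∧ (findHighest arr).1 = arr[idx]! ∧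
      (findHighest arr).2 = arr.eraseIdx idx ∧ ∀ y ∈ arr, y ≤ arr[idx]! := by
  have hlen : 1 ≤ (arr.length : Int) := by
    have : 0 < arr.length := List.length_pos_iff.mpr h
    omega
  have hinit : GoodFH arr 1 ((0 : Int), PySem.List.pyGetD arr 0 0) := by
    refine ⟨le_rfl, by omega, rfl, ?_⟩
    intro j hj0 hj1
    have : j = 0 := by omega
    subst this; exact le_rfl
  have hg := fold_goodFH arr (arr.length - 1) 1 ((0 : Int), PySem.List.pyGetD arr 0 0)
    (by omega) le_rfl hinit
  set st := (PySem.List.pyRange 1 (arr.length : Int) 1).foldl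
    (fun h i => if PySem.List.pyGetD arr i 0 > h.2 then (i, PySem.List.pyGetD arr i 0) else h)
    ((0 : Int), PySem.List.pyGetD arr 0 0) with hst
  obtain ⟨hs0, hsa, hsv, hdom⟩ := hg
  refine ⟨st.1.toNat, by omega, ?_, ?_, ?_⟩
  · -- value
    have h1 : st.1 = ((st.1.toNat : Nat) : Int) := by omega
    have hidx : st.1.toNat < arr.length := by omega
    rw [show (findHighest arr).1 = st.2 from rfl, ← hsv, h1,
      PySem.List.pyGetD_ofNat arr st.1.toNat 0 hidx]
    rw [Int.toNat_natCast, getElem!_pos arr st.1.toNat hidx]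
  · -- new list
    have hidx : st.1.toNat < arr.length := by omega
    have h1 : st.1 = ((st.1.toNat : Nat) : Int) := by omega
    show PySem.List.slice arr (some 0) (some st.1) ++ PySem.List.slice arr (some (st.1 + 1)) none
        = arr.eraseIdx st.1.toNat
    rw [h1]
    rw [show ((st.1.toNat : Nat) : Int) + 1 = (((st.1.toNat + 1 : Nat)) : Int) by push_cast; ring]
    rw [show (some (0:Int)) = some (((0:Nat) : Int)) by norm_num]
    rw [PySem.List.slice_natCast, PySem.List.slice_from_natCast]
    simp [List.eraseIdx_eq_take_drop_succ]
    rw [show max st.1 0 = (st.1.toNat : Int) by omega, Int.toNat_natCast]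
  · -- max
    intro y hy
    obtain ⟨k, hk, rfl⟩ := List.mem_iff_getElem.mp hy
    have := hdom (k : Int) (by omega) (by omega)
    rw [PySem.List.pyGetD_ofNat arr k 0 hk] at this
    have h1 : st.1 = ((st.1.toNat : Nat) : Int) := by omega
    have hidx : st.1.toNat < arr.length := by omega
    rw [getElem!_pos arr st.1.toNat hidx, ← PySem.List.pyGetD_ofNat arr st.1.toNat 0 hidx, ← h1, hsv]
    exact this

theorem sortDesc_cons_erase (arr : List Int) (idx : Nat) (hidx : idx < arr.length)
    (hmax : ∀ y ∈ arr, y ≤ arr[idx]!) :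
    sortDesc arr = arr[idx]! :: sortDesc (arr.eraseIdx idx) := by
  have hget : arr[idx]! = arr[idx] := getElem!_pos arr idx hidx
  apply PySem.List.eq_of_perm_of_pairwise_le_of_injective (key := fun x : Int => -x)
    (fun a b hab => by simpa using hab)
  · refine (PySem.List.sorted_perm arr _ _).trans ?_
    rw [hget]
    refine (List.getElem_cons_eraseIdx_perm hidx).symm.trans ?_
    exact List.Perm.cons _ (PySem.List.sorted_perm _ _ _).symm
  · exact ((PySem.List.sorted_pairwise_rev arr (fun x => x)).imp (fun h => by simpa using h))
  · refine List.Pairwise.cons ?_ ((PySem.List.sorted_pairwise_rev _ (fun x => x)).imp (fun h => by simpa using h))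
    intro y hy
    have hy' : y ∈ arr.eraseIdx idx := (PySem.List.mem_sorted _ _ _ _).mp hy
    have := hmax y (List.mem_of_mem_eraseIdx hy')
    simpa using this

theorem loopA_eq (fuel : Nat) : ∀ (arr l r : List Int) (gl gr : Bool),
    fuel = arr.length → gr = !gl →
    loopA fuel arr l r gl gr =
      l ++ (splitB gl (sortDesc arr)).1 ++ (splitB gl (sortDesc arr)).2.reverse ++ r := by
  induction fuel with
  | zero =>
    intro arr l r gl gr hf hg
    have harr : arr = [] := by cases arr <;> simp_all
    subst harr
    have hs : PySem.List.sorted ([] : List Int) (fun x => x) true = [] := rfl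
    simp [loopA, sortDesc, hs, splitB]
  | succ f ih =>
    intro arr l r gl gr hf hg
    have hne : arr ≠ [] := by intro h; subst h; simp at hf
    obtain ⟨idx, hlt, h1, h2, hmax⟩ := findHighest_spec arr hne
    have hsd := sortDesc_cons_erase arr idx hlt hmax
    have hlen : f = (arr.eraseIdx idx).length := by
      rw [List.length_eraseIdx_of_lt hlt]; omega
    have hemp : arr.isEmpty = false := by simp [hne]
    subst hg
    simp only [loopA, hemp, Bool.false_eq_true, if_false]
    cases gl with
    | true =>
      simp only [Bool.not_true]
      rw [h1, h2, ih _ _ _ false true hlen rfl, hsd]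
      simp [splitB]
    | false =>
      simp only [Bool.not_false]
      rw [h1, h2, ih _ _ _ true false hlen rfl, hsd]
      simp [splitB]

theorem foldB_eq (s : List Int) : ∀ (k : Nat) (l r : List Int),
    (PySem.List.enumerate s (k : Int)).foldl
      (fun lr p => if PySem.Int.mod p.1 2 == 0 then (lr.1 ++ [p.2], lr.2) else (lr.1, lr.2 ++ [p.2]))
      (l, r) = (l ++ (splitB (k % 2 == 0) s).1, r ++ (splitB (k % 2 == 0) s).2) := by
  induction s with
  | nil => intro k l r; simp [PySem.List.enumerate_nil, splitB]
  | cons x t ih =>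
    intro k l r
    rw [PySem.List.enumerate_cons]
    have hcast : (k : Int) + 1 = ((k + 1 : Nat) : Int) := by push_cast; ring
    have hmod : PySem.Int.mod (k : Int) 2 = ((k % 2 : Nat) : Int) := by
      exact_mod_cast PySem.Int.mod_natCast k 2
    by_cases hk : k % 2 = 0
    · have h1 : (k + 1) % 2 = 1 := by omega
      simp only [List.foldl_cons, hmod, hk, Nat.cast_zero]
      rw [if_pos (by decide), hcast, ih (k + 1) (l ++ [x]) r, h1]
      simp [splitB]
    · have hk1 : k % 2 = 1 := by omega
      have h1 : (k + 1) % 2 = 0 := by omega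
      simp only [List.foldl_cons, hmod, hk1, Nat.cast_one]
      rw [if_neg (by decide), hcast, ih (k + 1) l (r ++ [x]), h1]
      simp [splitB]

-- ===== VERDICT (by name: the statement is the Claim_ definition above) =====
theorem make_valley_spec : Claim_equal_make_valley := by
  intro arr _
  have hb := foldB_eq (PySem.List.sorted arr (fun x => x) true) 0 [] []
  simp only [Nat.cast_zero, List.nil_append, Nat.zero_mod, beq_self_eq_true] at hb
  simp only [Spec_make_valley, make_valley, make_valley_alt, hb,
    loopA_eq arr.length arr [] [] true false rfl rfl,
    PySem.List.slice?_none_none_neg_one, sortDesc, Option.getD_some,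
    List.append_nil, List.nil_append]
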